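-- pv_equiv track=rewrite | github.com/benbendaisy/CommunicationCodes | python_module/examples/58_Length_of_Last_Word.py | lengthOfLastWord3
-- ===== SOURCE A (Python) =====
-- def lengthOfLastWord3(s: str) -> int:
--     if not s:
--         return 0
--     p = len(s) - 1
--     while p >= 0 and s[p] == " ":
--         p -= 1
--
--     length = 0
--     while p >= 0 and s[p] != " ":
--         p -= 1
--         length += 1
--     return length
-- ===== SOURCE B (Python) =====
-- def lengthOfLastWord3(s: str) -> int:
--     cur = 0
--     ans = 0
--     for c in s:
--         if c == ' ':
--             cur = 0
--         else:
--             cur += 1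
--             ans = cur
--     return ans
-- ===== Notes on version B (the rewrite author's own statement) =====
-- stated objective: alternative
-- what changed: Replaces A's two backward index-scan while-loops (skip trailing spaces, then count) with a single forward left-to-right pass that maintains the current run length of non-space characters and records it as the answer whenever the run grows, so the answer left at the end is the length of the last word.
import Mathlib
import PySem

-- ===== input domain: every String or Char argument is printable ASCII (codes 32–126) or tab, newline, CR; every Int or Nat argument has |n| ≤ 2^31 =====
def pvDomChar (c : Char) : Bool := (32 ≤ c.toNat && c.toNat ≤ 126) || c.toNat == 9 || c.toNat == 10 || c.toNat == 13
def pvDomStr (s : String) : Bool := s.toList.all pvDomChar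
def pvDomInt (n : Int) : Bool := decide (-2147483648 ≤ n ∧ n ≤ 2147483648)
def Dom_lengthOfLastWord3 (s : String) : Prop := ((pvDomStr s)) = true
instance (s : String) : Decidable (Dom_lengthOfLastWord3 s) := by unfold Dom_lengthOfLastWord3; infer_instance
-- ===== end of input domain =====

-- B replaces A's two backward index-scan loops with one forward pass keeping the
-- current non-space run length and the last recorded word length (alternative, same cost).

-- ===== PORT A =====
-- first while loop: while p >= 0 and s[p] == " ": p -= 1
def llwSkip (cs : List Char) (p : Int) : Int :=
  if h : 0 ≤ p ∧ PySem.List.pyGet? cs p = some ' ' then llwSkip cs (p - 1) else p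
termination_by (p + 1).toNat
decreasing_by have := h.1; omega

-- second while loop: while p >= 0 and s[p] != " ": p -= 1; length += 1
def llwCount (cs : List Char) (p : Int) (length : Int) : Int :=
  if h : 0 ≤ p ∧ ¬ (PySem.List.pyGet? cs p = some ' ') then llwCount cs (p - 1) (length + 1) else length
termination_by (p + 1).toNat
decreasing_by have := h.1; omega

def lengthOfLastWord3 (s : String) : Int :=
  if s.toList = [] then 0
  else
    let p := llwSkip s.toList ((s.toList.length : Int) - 1)
    llwCount s.toList p 0

-- ===== PORT B =====
-- for c in s: if c == ' ': cur = 0 else: cur += 1; ans = cur  — a fold over (cur, ans)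
def llwStep (st : Int × Int) (c : Char) : Int × Int :=
  if c = ' ' then (0, st.2) else (st.1 + 1, st.1 + 1)

def lengthOfLastWord3_alt (s : String) : Int :=
  (s.toList.foldl llwStep (0, 0)).2

-- ===== PRECONDITION & SPEC =====
def Spec_lengthOfLastWord3 (s : String) (out : Int) : Prop := out = lengthOfLastWord3_alt s
instance (s : String) (out : Int) : Decidable (Spec_lengthOfLastWord3 s out) := by unfold Spec_lengthOfLastWord3; infer_instance

-- ===== CLAIM (what is proved, stated in full; the proofs are below) =====
def Claim_equal_lengthOfLastWord3 : Prop := ∀ (s : String), Dom_lengthOfLastWord3 s → Spec_lengthOfLastWord3 s (lengthOfLastWord3 s)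

-- ===== LEMMAS AND PROOFS =====

-- length of the last space-separated word, canonical form both sides are reduced to
def llwCanon (cs : List Char) : Int :=
  (((cs.reverse.dropWhile (· == ' ')).takeWhile (fun c => c != ' ')).length : Int)

theorem llwSkip_spec (cs : List Char) (p : Nat) (hp : p ≤ cs.length) :
    llwSkip cs ((p : Int) - 1)
      = (p : Int) - 1 - (((cs.take p).reverse.takeWhile (· == ' ')).length : Int) := by
  induction p with
  | zero =>
      rw [llwSkip]
      simp
  | succ p ih =>
      have hlt : p < cs.length := by omega
      have harg : ((p + 1 : Nat) : Int) - 1 = (p : Int) := by push_cast; ring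
      rw [harg, llwSkip]
      have hget : PySem.List.pyGet? cs ((p : Nat) : Int) = some cs[p] := by
        rw [PySem.List.pyGet?_natCast]; exact List.getElem?_eq_getElem hlt
      have htake : cs.take (p + 1) = cs.take p ++ [cs[p]] := by
        rw [List.take_add_one, List.getElem?_eq_getElem hlt]; rfl
      by_cases hc : cs[p] = ' '
      · rw [dif_pos ⟨by positivity, by rw [hget, hc]⟩, htake, List.reverse_append]
        rw [ih (by omega)]
        simp [hc]
        omega
      · rw [dif_neg (by simp [hget, hc]), htake, List.reverse_append]
        simp only [List.reverse_cons, List.reverse_nil, List.nil_append, List.singleton_append,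
          List.takeWhile_cons]
        simp [hc]

theorem llwCount_spec (cs : List Char) (p : Nat) (hp : p ≤ cs.length) (acc : Int) :
    llwCount cs ((p : Int) - 1) acc
      = acc + (((cs.take p).reverse.takeWhile (fun c => c != ' ')).length : Int) := by
  induction p generalizing acc with
  | zero =>
      rw [llwCount]
      simp
  | succ p ih =>
      have hlt : p < cs.length := by omega
      have harg : ((p + 1 : Nat) : Int) - 1 = (p : Int) := by push_cast; ring
      rw [harg, llwCount]
      have hget : PySem.List.pyGet? cs ((p : Nat) : Int) = some cs[p] := by
        rw [PySem.List.pyGet?_natCast]; exact List.getElem?_eq_getElem hlt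
      have htake : cs.take (p + 1) = cs.take p ++ [cs[p]] := by
        rw [List.take_add_one, List.getElem?_eq_getElem hlt]; rfl
      by_cases hc : cs[p] = ' '
      · rw [dif_neg (by simp [hget, hc]), htake, List.reverse_append]
        simp only [List.reverse_cons, List.reverse_nil, List.nil_append, List.singleton_append,
          List.takeWhile_cons]
        simp [hc]
      · rw [dif_pos ⟨by positivity, by simp [hget, hc]⟩, htake, List.reverse_append]
        rw [ih (by omega) (acc + 1)]
        simp [hc]
        omega

theorem dropWhile_eq_drop_len_takeWhile {α : Type} (p : α → Bool) (l : List α) :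
    l.dropWhile p = l.drop (l.takeWhile p).length := by
  induction l with
  | nil => simp
  | cons a l ih => by_cases h : p a <;> simp [h, ih]

theorem len_takeWhile_le {α : Type} (p : α → Bool) (l : List α) :
    (l.takeWhile p).length ≤ l.length := by
  induction l with
  | nil => simp
  | cons a l ih =>
      by_cases h : p a
      · simp [h]; omega
      · simp [h]

theorem portA_canon (s : String) : lengthOfLastWord3 s = llwCanon s.toList := by
  unfold lengthOfLastWord3 llwCanon
  by_cases hs : s.toList = []
  · simp [hs]
  · rw [if_neg hs]
    have hk : ((s.toList.reverse.takeWhile (· == ' ')).length) ≤ s.toList.length := by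
      have h := len_takeWhile_le (· == ' ') s.toList.reverse
      rwa [List.length_reverse] at h
    have h1 := llwSkip_spec s.toList s.toList.length (le_refl _)
    rw [List.take_length] at h1
    show llwCount s.toList (llwSkip s.toList ((s.toList.length : Int) - 1)) 0 = _
    rw [h1]
    have h2 : ((s.toList.length : Int) - 1 - ((s.toList.reverse.takeWhile (· == ' ')).length : Int))
        = (((s.toList.length - (s.toList.reverse.takeWhile (· == ' ')).length : Nat)) : Int) - 1 := by
      omega
    rw [h2, llwCount_spec _ _ (by omega), zero_add]
    have h3 : (s.toList.take (s.toList.length - (s.toList.reverse.takeWhile (· == ' ')).length)).reverse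
        = s.toList.reverse.dropWhile (· == ' ') := by
      rw [List.reverse_take]
      have h4 : s.toList.length - (s.toList.length - (s.toList.reverse.takeWhile (· == ' ')).length)
          = (s.toList.reverse.takeWhile (· == ' ')).length := by omega
      rw [h4, dropWhile_eq_drop_len_takeWhile]
    rw [h3]

-- loop invariant of B: after processing cs, cur is the trailing non-space run
-- and ans is the last-word length of the processed prefix
theorem foldl_llwStep_inv (cs : List Char) :
    cs.foldl llwStep (0, 0)
      = (((cs.reverse.takeWhile (fun c => c != ' ')).length : Int), llwCanon cs) := by
  induction cs using List.reverseRecOn with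
  | nil => simp [llwCanon]
  | append_singleton l c ih =>
      rw [List.foldl_append, ih]
      simp only [List.foldl_cons, List.foldl_nil, llwStep, llwCanon,
        List.reverse_append, List.reverse_singleton, List.singleton_append]
      by_cases hc : c = ' '
      · rw [if_pos hc]
        simp [hc]
      · rw [if_neg hc]
        simp [hc]

theorem portB_canon (s : String) : lengthOfLastWord3_alt s = llwCanon s.toList := by
  unfold lengthOfLastWord3_alt
  rw [foldl_llwStep_inv]

-- ===== VERDICT (by name: the statement is the Claim_ definition above) =====
theorem lengthOfLastWord3_spec : Claim_equal_lengthOfLastWord3 := by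
  intro s _
  unfold Spec_lengthOfLastWord3
  rw [portA_canon, portB_canon]
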